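-- pv_equiv track=rewrite | github.com/bsheline/unsent | orchestration/dispatcher.py | subtrees_conflict
-- ===== SOURCE A (Python) =====
-- def subtrees_conflict(needed: set[str], claimed: set[str]) -> bool:
--     """True if any needed subtree is a prefix of or prefixed by any claimed subtree."""
--     for n in needed:
--         n = n.rstrip("/") + "/"
--         for c in claimed:
--             c = c.rstrip("/") + "/"
--             if n.startswith(c) or c.startswith(n):
--                 return True
--     return False
-- ===== SOURCE B (Python) =====
-- def _norm(p: str) -> str:
--     return p.rstrip("/") + "/"
--
--
-- def _slash_prefixes(p: str) -> list[str]: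
--     return [p[: i + 1] for i, ch in enumerate(p) if ch == "/"]
--
--
-- def _covers(n: str, cset: set, cprefixes: set) -> bool:
--     n = _norm(n)
--     return n in cprefixes or not cset.isdisjoint(_slash_prefixes(n))
--
--
-- def subtrees_conflict(needed: set[str], claimed: set[str]) -> bool:
--     """True if any needed subtree is a prefix of or prefixed by any claimed subtree.
--
--     Indexes claimed once (normalized paths + all their slash-terminated
--     prefixes); each needed path is then answered by hash lookups.
--     """
--     cset = {_norm(c) for c in claimed}
--     cprefixes = {q for c in cset for q in _slash_prefixes(c)}
--     return any(_covers(n, cset, cprefixes) for n in needed)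
-- ===== Notes on version B (the rewrite author's own statement) =====
-- stated objective: alternative
-- what changed: Instead of comparing every needed path against every claimed path, B builds once a set of the normalized claimed paths and a set of all their slash-terminated prefixes, then answers each needed path with hash lookups; the inner scan over claimed disappears.
import Mathlib
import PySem

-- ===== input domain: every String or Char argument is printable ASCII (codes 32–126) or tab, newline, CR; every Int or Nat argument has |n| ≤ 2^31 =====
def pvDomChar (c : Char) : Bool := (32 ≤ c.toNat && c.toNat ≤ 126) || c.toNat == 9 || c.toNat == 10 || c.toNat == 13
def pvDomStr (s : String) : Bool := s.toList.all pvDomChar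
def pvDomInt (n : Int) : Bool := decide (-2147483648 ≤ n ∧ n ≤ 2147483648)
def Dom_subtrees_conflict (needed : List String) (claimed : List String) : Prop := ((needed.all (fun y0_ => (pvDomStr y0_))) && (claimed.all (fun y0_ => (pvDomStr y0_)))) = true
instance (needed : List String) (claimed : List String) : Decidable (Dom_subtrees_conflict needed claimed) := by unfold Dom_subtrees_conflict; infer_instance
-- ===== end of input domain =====

-- B indexes the claimed paths once (set of normalized paths + set of all their
-- slash-terminated prefixes) and probes each needed path with hash lookups,
-- instead of A's pairwise scan; objective: alternative algorithm, same result.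


-- ===== PORT A =====
-- s.rstrip("/") + "/" : rstrip("/") has no PySem primitive for a character
-- argument, ported by hand — it drops exactly the trailing '/' characters (exact).
def pvRstripSlash (s : String) : List Char :=
  (s.toList.reverse.dropWhile (fun ch => ch == '/')).reverse ++ ['/']

def subtrees_conflict (needed : List String) (claimed : List String) : Bool :=
  needed.any (fun n0 =>
    let n := pvRstripSlash n0
    claimed.any (fun c0 =>
      let c := pvRstripSlash c0
      PySem.Chars.startswith n c || PySem.Chars.startswith c n))

-- ===== PORT B =====
-- _norm(p) = p.rstrip("/") + "/" (same hand-port of rstrip("/") as on the A side)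
def pvNorm (p : String) : List Char :=
  (p.toList.reverse.dropWhile (fun ch => ch == '/')).reverse ++ ['/']

-- _slash_prefixes(p) = [p[:i+1] for i, ch in enumerate(p) if ch == "/"]
def pvSlashPrefixes (p : List Char) : List (List Char) :=
  ((PySem.List.enumerate p).filter (fun q => q.2 == '/')).map
    (fun q => PySem.List.slice p none (some (q.1 + 1)))

-- _covers(n, cset, cprefixes)
def pvCovers (n0 : List Char) (cset cprefixes : PySem.Set (List Char)) : Bool :=
  PySem.Set.contains cprefixes n0 || !(PySem.Set.isdisjoint cset (pvSlashPrefixes n0))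

def subtrees_conflict_alt (needed : List String) (claimed : List String) : Bool :=
  let cset : PySem.Set (List Char) := PySem.Set.ofList (claimed.map (fun c => pvNorm c))
  let cprefixes : PySem.Set (List Char) :=
    PySem.Set.ofList (cset.flatMap (fun c => pvSlashPrefixes c))
  needed.any (fun n => pvCovers (pvNorm n) cset cprefixes)

-- ===== PRECONDITION & SPEC =====
def Spec_subtrees_conflict (needed : List String) (claimed : List String) (out : Bool) : Prop := out = subtrees_conflict_alt needed claimed
instance (needed : List String) (claimed : List String) (out : Bool) : Decidable (Spec_subtrees_conflict needed claimed out) := by unfold Spec_subtrees_conflict; infer_instance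

-- ===== CLAIM (what is proved, stated in full; the proofs are below) =====
def Claim_equal_subtrees_conflict : Prop := ∀ (needed : List String) (claimed : List String), Dom_subtrees_conflict needed claimed → Spec_subtrees_conflict needed claimed (subtrees_conflict needed claimed)

-- ===== LEMMAS AND PROOFS =====

-- x is a slash-terminated prefix of cs
def pvIsSP (x cs : List Char) : Prop := ∃ k : Nat, ∃ h : k < cs.length, cs[k] = '/' ∧ x = cs.take (k + 1)

theorem pv_slice_take {α : Type} (cs : List α) (k : Nat) :
    PySem.List.slice cs none (some ((0 : Int) + (k : Int) + 1)) = cs.take (k + 1) := by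
  have h : (0 : Int) + (k : Int) + 1 = ((k + 1 : Nat) : Int) := by push_cast; ring
  rw [h, PySem.List.slice_to _ (by positivity)]
  simp

theorem pvNorm_eq (s : String) : pvNorm s = pvRstripSlash s := rfl

theorem pvNorm_last (s : String) : (pvNorm s).getLast? = some '/' := by
  simp [pvNorm]

theorem pvNorm_ne_nil (s : String) : pvNorm s ≠ [] := by
  simp [pvNorm]

-- a slash-terminated x is an SP of cs iff it is a plain prefix of cs
theorem pvIsSP_iff (x cs : List Char) (hne : x ≠ []) (hl : x.getLast? = some '/') :
    pvIsSP x cs ↔ x <+: cs := by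
  constructor
  · rintro ⟨k, hk, _, rfl⟩
    exact List.take_prefix _ _
  · intro hpre
    have hlen : x.length ≤ cs.length := hpre.length_le
    have hpos : 0 < x.length := List.length_pos_iff.mpr hne
    refine ⟨x.length - 1, by omega, ?_, ?_⟩
    · have hx : x[x.length - 1]'(by omega) = '/' := by
        have h1 : x[x.length - 1]? = some '/' := by
          rw [← List.getLast?_eq_getElem?]; exact hl
        have h2 := List.getElem?_eq_getElem (l := x) (i := x.length - 1) (by omega)
        rw [h2] at h1
        exact Option.some_injective _ h1
      have := List.IsPrefix.getElem hpre (i := x.length - 1) (by omega)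
      exact this.symm.trans hx
    · have : x.length - 1 + 1 = x.length := by omega
      rw [this]
      exact (List.prefix_iff_eq_take.mp hpre)

theorem pv_mem_slashPrefixes (p x : List Char) : x ∈ pvSlashPrefixes p ↔ pvIsSP x p := by
  unfold pvSlashPrefixes pvIsSP
  simp only [List.mem_map, List.mem_filter]
  constructor
  · rintro ⟨q, ⟨hq, hsl⟩, rfl⟩
    obtain ⟨k, hk, rfl⟩ := (PySem.List.mem_enumerate_iff _ _ _).mp hq
    exact ⟨k, hk, by simpa using hsl, (pv_slice_take p k)⟩
  · rintro ⟨k, hk, hsl, rfl⟩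
    exact ⟨((0 : Int) + (k : Int), p[k]),
      ⟨(PySem.List.mem_enumerate_iff _ _ _).mpr ⟨k, hk, rfl⟩, by simpa using hsl⟩,
      pv_slice_take p k⟩

-- the common semantic characterisation
theorem pvA_iff (needed claimed : List String) :
    subtrees_conflict needed claimed = true ↔
      ∃ n ∈ needed, ∃ c ∈ claimed, (pvNorm c <+: pvNorm n ∨ pvNorm n <+: pvNorm c) := by
  simp [subtrees_conflict, List.any_eq_true, PySem.Chars.startswith_iff, pvNorm_eq]

theorem pvB_iff (needed claimed : List String) :
    subtrees_conflict_alt needed claimed = true ↔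
      ∃ n ∈ needed, ∃ c ∈ claimed, (pvNorm c <+: pvNorm n ∨ pvNorm n <+: pvNorm c) := by
  unfold subtrees_conflict_alt pvCovers
  simp only [List.any_eq_true, Bool.or_eq_true, Bool.not_eq_true',
    PySem.Set.contains_iff, PySem.Set.mem_ofList, List.mem_flatMap, List.mem_map,
    pv_mem_slashPrefixes]
  refine exists_congr fun n => and_congr_right fun _ => ?_
  have hdisj : ∀ (t : List (List Char)),
      (PySem.Set.isdisjoint (PySem.Set.ofList (claimed.map (fun c => pvNorm c))) t = false) ↔
        ∃ x ∈ PySem.Set.ofList (claimed.map (fun c => pvNorm c)), x ∈ t := by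
    intro t
    rw [Bool.eq_false_iff, Ne, PySem.Set.isdisjoint_iff]
    push Not
    simp
  constructor
  · rintro (h1 | h2)
    · -- pvNorm n is a slash-terminated prefix of some claimed path
      obtain ⟨a, ⟨c, hc, rfl⟩, hsp⟩ := h1
      exact ⟨c, hc, Or.inr ((pvIsSP_iff _ _ (pvNorm_ne_nil n) (pvNorm_last n)).mp hsp)⟩
    · -- some normalized claimed path is a slash-terminated prefix of pvNorm n
      obtain ⟨x, hx, hsp⟩ := (hdisj _).mp h2
      obtain ⟨c, hc, rfl⟩ := by
        simpa only [PySem.Set.mem_ofList, List.mem_map] using hx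
      exact ⟨c, hc, Or.inl
        ((pvIsSP_iff _ _ (pvNorm_ne_nil c) (pvNorm_last c)).mp
          ((pv_mem_slashPrefixes _ _).mp hsp))⟩
  · rintro ⟨c, hc, hpre | hpre⟩
    · right
      refine (hdisj _).mpr ⟨pvNorm c, ?_, ?_⟩
      · simp only [PySem.Set.mem_ofList, List.mem_map]
        exact ⟨c, hc, rfl⟩
      · exact (pv_mem_slashPrefixes _ _).mpr
          ((pvIsSP_iff _ _ (pvNorm_ne_nil c) (pvNorm_last c)).mpr hpre)
    · left
      exact ⟨pvNorm c, ⟨c, hc, rfl⟩,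
        (pvIsSP_iff _ _ (pvNorm_ne_nil n) (pvNorm_last n)).mpr hpre⟩

-- ===== VERDICT (by name: the statement is the Claim_ definition above) =====
theorem subtrees_conflict_spec : Claim_equal_subtrees_conflict := by
  intro needed claimed _
  unfold Spec_subtrees_conflict
  rw [Bool.eq_iff_iff, pvA_iff, pvB_iff]
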